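-- pv_equiv track=rewrite | github.com/jasonntruong/Coupon-Chef | backend/main.py | findSaleSavings
-- ===== SOURCE A (Python) =====
-- def findSaleSavings(saleStory):
--     allowed = ".0123456789"
--     savingStr = ""
--     priceArr = str(saleStory).split('$')
--
--     if (len(priceArr) > 1):
--         priceStr = priceArr[1]
--     else:
--         priceStr = priceArr[0]
--
--     for c in priceStr:
--         if (c not in allowed):
--             break
--         savingStr += c
--     return savingStr
-- ===== SOURCE B (Python) =====
-- def findSaleSavings(saleStory):
--     text = str(saleStory)
--     s = text[text.find('$') + 1:]
--     return s[:len(s) - len(s.lstrip('.0123456789'))]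
-- ===== Notes on version B (the rewrite author's own statement) =====
-- stated objective: simpler
-- what changed: Replaces the split-on-dollar pass plus a character-accumulating loop with find-based slicing and an lstrip-length computation: the leading numeric run is exactly the part of the tail that lstrip with the allowed character set removes, so no explicit loop and no list of split parts is built.
import Mathlib
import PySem

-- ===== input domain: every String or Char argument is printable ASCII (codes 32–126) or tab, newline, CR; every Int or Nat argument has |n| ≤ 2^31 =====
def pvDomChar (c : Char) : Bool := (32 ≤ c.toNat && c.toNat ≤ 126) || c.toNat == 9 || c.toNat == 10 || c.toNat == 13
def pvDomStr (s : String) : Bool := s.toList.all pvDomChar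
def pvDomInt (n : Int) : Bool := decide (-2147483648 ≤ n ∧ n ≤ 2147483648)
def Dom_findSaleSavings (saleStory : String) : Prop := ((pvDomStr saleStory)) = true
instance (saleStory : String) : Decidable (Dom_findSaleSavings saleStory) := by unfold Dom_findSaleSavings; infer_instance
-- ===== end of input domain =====

-- B replaces split('$') + a character-accumulating loop by find('$')-based slicing and an
-- lstrip-length computation (objective: simpler, no explicit loop).

-- ===== PORT A =====
-- the "for c in priceStr: if c not in allowed: break; savingStr += c" loop, step for step
def findSaleSavingsLoopA (allowed : List Char) : List Char → List Char → List Char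
  | acc, [] => acc
  | acc, c :: rest => if c ∈ allowed then findSaleSavingsLoopA allowed (acc ++ [c]) rest else acc

def findSaleSavings (saleStory : String) : String :=
  let allowed := ".0123456789".toList
  let priceArr := PySem.Chars.splitOn saleStory.toList ['$']
  let priceStr := if priceArr.length > 1 then priceArr.getD 1 [] else priceArr.getD 0 []
  String.ofList (findSaleSavingsLoopA allowed [] priceStr)

-- ===== PORT B =====
-- hand port of str.lstrip(chars) (not in PySem): drop the maximal leading run of chars in the set — exact
def lstripChars (chars : List Char) (s : List Char) : List Char := s.dropWhile (· ∈ chars)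

def findSaleSavings_alt (saleStory : String) : String :=
  let text := saleStory.toList
  let s := PySem.Chars.slice text (some (PySem.Chars.find text ['$'] + 1)) none
  let stripped := lstripChars ".0123456789".toList s
  String.ofList (PySem.Chars.slice s none (some ((s.length : Int) - stripped.length)))

-- ===== PRECONDITION & SPEC =====
def Spec_findSaleSavings (saleStory : String) (out : String) : Prop := out = findSaleSavings_alt saleStory
instance (saleStory : String) (out : String) : Decidable (Spec_findSaleSavings saleStory out) := by unfold Spec_findSaleSavings; infer_instance

-- ===== CLAIM (what is proved, stated in full; the proofs are below) =====
def Claim_equal_findSaleSavings : Prop := ∀ (saleStory : String), Dom_findSaleSavings saleStory → Spec_findSaleSavings saleStory (findSaleSavings saleStory)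

-- ===== LEMMAS AND PROOFS =====

-- A's loop is takeWhile on the allowed set
theorem loopA_eq_takeWhile (allowed acc s : List Char) :
    findSaleSavingsLoopA allowed acc s = acc ++ s.takeWhile (· ∈ allowed) := by
  induction s generalizing acc with
  | nil => simp [findSaleSavingsLoopA]
  | cons c rest ih =>
    simp only [findSaleSavingsLoopA, List.takeWhile_cons]
    by_cases h : c ∈ allowed
    · simp [h, ih]
    · simp [h]

-- splitOn.go with a single-character separator, characterized
theorem splitOn_go_single (d : Char) :
    ∀ (fuel : Nat) (l cur : List Char) (acc : List (List Char)), l.length < fuel →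
    PySem.Chars.splitOn.go [d] fuel l cur acc =
      acc.reverse ++ (cur.reverse ++ l.takeWhile (· ≠ d)) ::
        (if d ∈ l then
          PySem.Chars.splitOn.go [d] ((l.dropWhile (· ≠ d)).tail.length + 1)
            ((l.dropWhile (· ≠ d)).tail) [] []
         else []) := by
  intro fuel
  induction fuel using Nat.strong_induction_on with
  | _ fuel ih =>
    intro l cur acc hlen
    match fuel, hlen with
    | f + 1, hlen =>
      match l, hlen with
      | [], _ => simp [PySem.Chars.splitOn.go]
      | c :: rest, hlen =>
        have hr : rest.length < f := by simpa using Nat.lt_of_succ_lt_succ hlen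
        by_cases hc : c = d
        · subst hc
          have hstep : PySem.Chars.splitOn.go [c] (f + 1) (c :: rest) cur acc
              = PySem.Chars.splitOn.go [c] f rest [] (cur.reverse :: acc) := by
            simp [PySem.Chars.splitOn.go, List.isPrefixOf]
          rw [hstep, ih f (Nat.lt_succ_self f) rest [] (cur.reverse :: acc) hr]
          have e2 := ih (rest.length + 1) (by omega) rest [] [] (Nat.lt_succ_self _)
          simp [List.takeWhile_cons, List.dropWhile_cons, e2]
        · have hstep : PySem.Chars.splitOn.go [d] (f + 1) (c :: rest) cur acc
              = PySem.Chars.splitOn.go [d] f rest (c :: cur) acc := by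
            have : ¬ ([d].isPrefixOf (c :: rest) = true) := by
              simp [List.isPrefixOf]; exact fun hh => (hc hh.symm).elim
            simp [PySem.Chars.splitOn.go, this]
          rw [hstep, ih f (Nat.lt_succ_self f) rest (c :: cur) acc hr]
          have hmem : (d ∈ c :: rest) = (d ∈ rest) := by
            simp [List.mem_cons]; exact fun hh => (hc hh.symm).elim
          simp [List.takeWhile_cons, List.dropWhile_cons, hc, Ne.symm hc, hmem]

-- find.go with a single-character needle, characterized
theorem find_go_single (d : Char) :
    ∀ (l : List Char) (k : Nat),
    PySem.Chars.find.go [d] l k =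
      if d ∈ l then ((k + (l.takeWhile (· ≠ d)).length : Nat) : Int) else -1 := by
  intro l
  induction l with
  | nil => intro k; simp [PySem.Chars.find.go]
  | cons c t ih =>
    intro k
    by_cases h : c = d
    · subst h
      simp [PySem.Chars.find.go, List.isPrefixOf]
    · have : ¬ ([d].isPrefixOf (c :: t) = true) := by
        simp [List.isPrefixOf]; exact fun hh => (h hh.symm).elim
      simp only [PySem.Chars.find.go, this]
      rw [ih (k + 1)]
      by_cases hm : d ∈ t
      · simp [hm, h, List.takeWhile_cons]
        push_cast; ring
      · simp [hm, h]
        exact fun hh => (h hh.symm).elim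

-- first element surviving dropWhile fails the predicate
theorem dropWhile_cons_head_false (p : Char → Bool) :
    ∀ (l : List Char) (a : Char) (t : List Char), l.dropWhile p = a :: t → p a = false := by
  intro l
  induction l with
  | nil => intro a t h; simp [List.dropWhile] at h
  | cons b r ih =>
    intro a t h
    by_cases hb : p b = true
    · rw [List.dropWhile_cons_of_pos hb] at h
      exact ih a t h
    · rw [List.dropWhile_cons_of_neg hb] at h
      obtain ⟨rfl, -⟩ := List.cons.inj h
      simpa using hb

-- takeWhile through an inner takeWhile whose predicate is implied
theorem takeWhile_takeWhile_of_imp (p q : Char → Bool) (h : ∀ a, p a = true → q a = true) :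
    ∀ l : List Char, (l.takeWhile q).takeWhile p = l.takeWhile p := by
  intro l
  induction l with
  | nil => rfl
  | cons a t ih =>
    by_cases hq : q a = true
    · by_cases hp : p a = true
      · simp [List.takeWhile_cons, hq, hp, ih]
      · simp [List.takeWhile_cons, hq, hp]
    · have hp : ¬ p a = true := fun hp => hq (h a hp)
      simp [List.takeWhile_cons, hq, hp]

-- dropping past the takeWhile prefix and its first failing element
theorem drop_takeWhile_succ (p : Char → Bool) (l : List Char) (a : Char) (t : List Char)
    (h : l.dropWhile p = a :: t) :
    l.drop ((l.takeWhile p).length + 1) = t := by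
  induction l generalizing a t with
  | nil => simp [List.dropWhile] at h
  | cons b r ih =>
    by_cases hb : p b = true
    · rw [List.dropWhile_cons_of_pos hb] at h
      rw [List.takeWhile_cons_of_pos hb]
      simpa using ih a t h
    · rw [List.dropWhile_cons_of_neg hb] at h
      rw [List.takeWhile_cons_of_neg hb]
      obtain ⟨-, ht⟩ := List.cons.inj h
      simp [ht]

-- B's final slice computes takeWhile
theorem slice_minus_dropWhile (p : Char → Bool) (s : List Char) :
    PySem.Chars.slice s none (some ((s.length : Int) - (s.dropWhile p).length)) = s.takeWhile p := by
  have hsum : ∀ l : List Char, (l.takeWhile p).length + (l.dropWhile p).length = l.length := by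
    intro l
    induction l with
    | nil => rfl
    | cons a tl ih =>
      cases h : p a <;> simp [List.takeWhile_cons, List.dropWhile_cons, h] <;> omega
  have hval : (s.length : Int) - (s.dropWhile p).length = ((s.takeWhile p).length : Int) := by
    have := hsum s
    omega
  rw [PySem.Chars.slice_eq_listSlice, hval, PySem.List.slice_to s (by positivity)]
  rw [Int.toNat_natCast]
  exact ((List.prefix_iff_eq_take).mp (List.takeWhile_prefix p)).symm

-- Characterization of A's price string and its agreement with B's tail, then the verdict
theorem findSaleSavings_spec : Claim_equal_findSaleSavings := by
  intro s _
  show findSaleSavings s = findSaleSavings_alt s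
  unfold findSaleSavings findSaleSavings_alt
  have himp : ∀ a : Char, (decide (a ∈ ".0123456789".toList)) = true →
      (decide (a ≠ '$')) = true := by
    intro a ha
    simp only [decide_eq_true_eq] at ha ⊢
    intro hEq; subst hEq; revert ha; decide
  have hsplit := splitOn_go_single '$' (s.toList.length + 1) s.toList [] [] (Nat.lt_succ_self _)
  have hfind := find_go_single '$' s.toList 0
  simp only [loopA_eq_takeWhile, List.nil_append, lstripChars]
  by_cases hmem : '$' ∈ s.toList
  · -- the dollar case: priceStr is parts[1], the (≠ '$')-run right after the first '$'
    have hdropne : s.toList.dropWhile (fun c => decide (c ≠ '$')) ≠ [] := by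
      intro hnil
      rw [List.dropWhile_eq_nil_iff] at hnil
      have := hnil '$' hmem
      simp at this
    obtain ⟨t, hdl⟩ : ∃ t, s.toList.dropWhile (fun c => decide (c ≠ '$')) = '$' :: t := by
      cases h : s.toList.dropWhile (fun c => decide (c ≠ '$')) with
      | nil => exact absurd h hdropne
      | cons a t =>
        have ha := dropWhile_cons_head_false (fun c => decide (c ≠ '$')) s.toList a t h
        simp only [decide_eq_false_iff_not, not_not] at ha
        exact ⟨t, by rw [ha]⟩
    have hparts : PySem.Chars.splitOn s.toList ['$'] =
        (s.toList.takeWhile (fun c => decide (c ≠ '$'))) ::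
          (t.takeWhile (fun c => decide (c ≠ '$'))) ::
          (if '$' ∈ t then
            PySem.Chars.splitOn.go ['$'] ((t.dropWhile (fun c => decide (c ≠ '$'))).tail.length + 1)
              ((t.dropWhile (fun c => decide (c ≠ '$'))).tail) [] [] else []) := by
      rw [PySem.Chars.splitOn, hsplit, if_pos hmem, hdl, List.tail_cons,
          splitOn_go_single '$' (t.length + 1) t [] [] (Nat.lt_succ_self _)]
      simp
    have hfindval : PySem.Chars.find s.toList ['$'] =
        ((s.toList.takeWhile (fun c => decide (c ≠ '$'))).length : Int) := by
      rw [PySem.Chars.find, hfind]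
      simp [hmem]
    have hslice : PySem.Chars.slice s.toList (some (PySem.Chars.find s.toList ['$'] + 1)) none = t := by
      rw [hfindval, PySem.Chars.slice_eq_listSlice]
      rw [show ((s.toList.takeWhile (fun c => decide (c ≠ '$'))).length : Int) + 1
            = (((s.toList.takeWhile (fun c => decide (c ≠ '$'))).length + 1 : Nat) : Int) by push_cast; ring]
      rw [PySem.List.slice_from s.toList (by positivity), Int.toNat_natCast]
      exact drop_takeWhile_succ (fun c => decide (c ≠ '$')) s.toList '$' t hdl
    rw [hparts, hslice, slice_minus_dropWhile]
    have hlen : ((s.toList.takeWhile (fun c => decide (c ≠ '$'))) ::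
          (t.takeWhile (fun c => decide (c ≠ '$'))) ::
          (if '$' ∈ t then
            PySem.Chars.splitOn.go ['$'] ((t.dropWhile (fun c => decide (c ≠ '$'))).tail.length + 1)
              ((t.dropWhile (fun c => decide (c ≠ '$'))).tail) [] [] else [])).length > 1 := by
      simp only [List.length_cons]
      omega
    rw [if_pos hlen]
    simp only [List.getD_cons_succ, List.getD_cons_zero]
    rw [takeWhile_takeWhile_of_imp _ _ himp t]
  · -- no dollar: priceStr is the whole string and find returns -1
    have htw : s.toList.takeWhile (fun c => decide (c ≠ '$')) = s.toList := by
      rw [List.takeWhile_eq_self_iff]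
      simp only [decide_eq_true_eq]
      intro x hx hEq
      exact hmem (hEq ▸ hx)
    have hparts : PySem.Chars.splitOn s.toList ['$'] = [s.toList] := by
      rw [PySem.Chars.splitOn, hsplit]
      simp only [List.reverse_nil, List.nil_append, if_neg hmem]
      rw [htw]
    have hslice : PySem.Chars.slice s.toList (some (PySem.Chars.find s.toList ['$'] + 1)) none = s.toList := by
      rw [PySem.Chars.find, hfind]
      simp only [hmem, if_false]
      rw [PySem.Chars.slice_eq_listSlice]
      rw [show (-1 : Int) + 1 = ((0 : Nat) : Int) from rfl]
      rw [PySem.List.slice_from s.toList (by positivity), Int.toNat_natCast]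
      simp
    rw [hparts, hslice, slice_minus_dropWhile]
    simp
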